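-- pv_equiv track=rewrite | github.com/cliffrwong/quality_estimation | qescore/qe.py | buckify_data
-- ===== SOURCE A (Python) =====
-- _buckets = [9, 14, 24, 49, 69, 79, 99]
--
-- def buckify_data(data):
--     data_set = [[] for _ in _buckets]
--     for features, label in data:
--         for bucket_id, input_size in enumerate(_buckets):
--             if len(features) <= input_size:
--                 data_set[bucket_id].append((features, label))
--                 break
--     return data_set
-- ===== SOURCE B (Python) =====
-- _buckets = [9, 14, 24, 49, 69, 79, 99]
--
-- def _bisect_left(a, x):
--     lo, hi = 0, len(a)
--     while lo < hi:
--         mid = (lo + hi) // 2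
--         if a[mid] < x:
--             lo = mid + 1
--         else:
--             hi = mid
--     return lo
--
-- def buckify_data(data):
--     data_set = [[] for _ in _buckets]
--     for features, label in data:
--         idx = _bisect_left(_buckets, len(features))
--         if idx < len(_buckets):
--             data_set[idx].append((features, label))
--     return data_set
-- ===== Notes on version B (the rewrite author's own statement) =====
-- stated objective: alternative
-- what changed: Replaces A's first-fit linear scan over the bucket thresholds (with break) by a hand-written bisect_left binary search into the sorted threshold list, appending only when the index is in range (items longer than 99 are dropped, as in A).
import Mathlib
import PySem

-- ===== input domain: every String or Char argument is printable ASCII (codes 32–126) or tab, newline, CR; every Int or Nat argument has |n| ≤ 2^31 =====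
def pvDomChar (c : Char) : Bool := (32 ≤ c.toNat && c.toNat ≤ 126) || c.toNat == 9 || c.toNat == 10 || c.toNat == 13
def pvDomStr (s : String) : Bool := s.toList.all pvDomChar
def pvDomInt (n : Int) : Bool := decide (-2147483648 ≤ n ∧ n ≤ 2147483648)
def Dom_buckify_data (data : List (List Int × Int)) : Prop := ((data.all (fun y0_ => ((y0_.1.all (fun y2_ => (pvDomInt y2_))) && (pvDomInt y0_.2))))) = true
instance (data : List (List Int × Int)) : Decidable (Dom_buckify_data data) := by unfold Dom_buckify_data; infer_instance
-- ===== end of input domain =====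

-- B replaces A's first-fit linear scan over the constant thresholds by a binary search
-- (bisect_left) index; an alternative of similar cost (the bucket list is a small constant).

-- ===== PORT A =====
def pvBuckets : List Int := [9, 14, 24, 49, 69, 79, 99]

-- inner 'for bucket_id, input_size in enumerate(_buckets)' loop with break
-- bucket_id from enumerate is an Int, always a small nonnegative index, so .toNat is exact
def pvInnerA (ds : List (List (List Int × Int))) (item : List Int × Int) :
    List (Int × Int) → List (List (List Int × Int))
  | [] => ds
  | (bid, sz) :: rest =>
    if (item.1.length : Int) ≤ sz then ds.set bid.toNat (ds.getD bid.toNat [] ++ [item])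
    else pvInnerA ds item rest

def buckify_data (data : List (List Int × Int)) : List (List (List Int × Int)) :=
  data.foldl (fun ds item => pvInnerA ds item (PySem.List.enumerate pvBuckets))
    (pvBuckets.map (fun _ => []))

-- ===== PORT B =====
-- the 'while lo < hi' loop of _bisect_left; fuel = len(a)+1 is a totality guard only
-- (each iteration shrinks hi-lo, which starts at a.length). a[mid] is always in range,
-- so getD with default 0 is exact.
def pvBisectGo (a : List Int) (x : Int) (fuel lo hi : Nat) : Nat :=
  if fuel = 0 then lo
  else if lo < hi then
    let mid := (lo + hi) / 2
    if a.getD mid 0 < x then pvBisectGo a x (fuel - 1) (mid + 1) hi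
    else pvBisectGo a x (fuel - 1) lo mid
  else lo
termination_by fuel
decreasing_by all_goals omega

def pvBisectLeft (a : List Int) (x : Int) : Nat :=
  pvBisectGo a x (a.length + 1) 0 a.length

def buckify_data_alt (data : List (List Int × Int)) : List (List (List Int × Int)) :=
  data.foldl
    (fun ds item =>
      let idx := pvBisectLeft pvBuckets (item.1.length : Int)
      if idx < pvBuckets.length then ds.set idx (ds.getD idx [] ++ [item]) else ds)
    (pvBuckets.map (fun _ => []))

-- ===== PRECONDITION & SPEC =====
def Spec_buckify_data (data : List (List Int × Int)) (out : List (List (List Int × Int))) : Prop := out = buckify_data_alt data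
instance (data : List (List Int × Int)) (out : List (List (List Int × Int))) : Decidable (Spec_buckify_data data out) := by unfold Spec_buckify_data; infer_instance

-- ===== CLAIM (what is proved, stated in full; the proofs are below) =====
def Claim_equal_buckify_data : Prop := ∀ (data : List (List Int × Int)), Dom_buckify_data data → Spec_buckify_data data (buckify_data data)

-- ===== LEMMAS AND PROOFS =====
theorem pvBisectLeft_buckets (x : Int) : pvBisectLeft pvBuckets x =
    if x ≤ 9 then 0 else if x ≤ 14 then 1 else if x ≤ 24 then 2 else if x ≤ 49 then 3
    else if x ≤ 69 then 4 else if x ≤ 79 then 5 else if x ≤ 99 then 6 else 7 := by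
  simp only [pvBisectLeft, pvBuckets]
  norm_num
  rw [pvBisectGo]; norm_num [List.getD]
  all_goals try split_ifs
  all_goals first | omega | (rw [pvBisectGo]; norm_num [List.getD])
  all_goals try split_ifs
  all_goals first | omega | (rw [pvBisectGo]; norm_num [List.getD])
  all_goals try split_ifs
  all_goals first | omega | (rw [pvBisectGo]; norm_num [List.getD])
  all_goals split_ifs <;> omega

theorem pvStep_eq (ds : List (List (List Int × Int))) (item : List Int × Int) :
    pvInnerA ds item (PySem.List.enumerate pvBuckets) =
      (let idx := pvBisectLeft pvBuckets (item.1.length : Int)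
       if idx < pvBuckets.length then ds.set idx (ds.getD idx [] ++ [item]) else ds) := by
  have henum : PySem.List.enumerate pvBuckets =
      [(0, 9), (1, 14), (2, 24), (3, 49), (4, 69), (5, 79), (6, 99)] := by decide
  rw [henum, pvBisectLeft_buckets]
  simp only [pvInnerA, pvBuckets, List.length_cons, List.length_nil]
  norm_num
  split_ifs <;> first | rfl | omega

-- ===== VERDICT (by name: the statement is the Claim_ definition above) =====
theorem buckify_data_spec : Claim_equal_buckify_data := by
  intro data _
  unfold Spec_buckify_data buckify_data buckify_data_alt
  rw [funext fun ds => funext fun item => pvStep_eq ds item]
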